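-- pv_equiv track=rewrite | github.com/Yawn-Sean/Daily_CF_Problems | daily_problems/2024/10/1007/personal_submission/cf325b_liryc.py | solve
-- ===== SOURCE A (Python) =====
-- def solve(n: int) -> list[int]:
--     ans = []
--
--     for t in range(60):
--         d = (1 << t) - 1
--         l, r = 1, 2 * 10 ** 9
--         while l <= r:
--             m = l + r >> 1
--             c = m * (m - 1) // 2 + m * d
--             if c < n:
--                 l = m + 1
--             elif c > n:
--                 r = m - 1
--             else:
--                 if m & 1:
--                     ans.append(m * (d + 1))
--                 break
--     if ans:
--         ans.sort()
--     else:
--         ans.append(-1)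
--     return ans
-- ===== SOURCE B (Python) =====
-- import math
--
-- def solve(n: int) -> list[int]:
--     ans = []
--     for t in range(60):
--         d = (1 << t) - 1
--         # solve m*(m-1)//2 + m*d == n, i.e. (2*m + b)^2 == b*b + 8*n with b = 2*d - 1
--         b = 2 * d - 1
--         disc = b * b + 8 * n
--         if disc < 0:
--             continue
--         s = math.isqrt(disc)
--         if s * s != disc or (s - b) % 2 != 0:
--             continue
--         m = (s - b) // 2
--         if 1 <= m <= 2 * 10 ** 9 and m % 2 == 1:
--             ans.append(m * (d + 1))
--     return sorted(ans) if ans else [-1]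
-- ===== Notes on version B (the rewrite author's own statement) =====
-- stated objective: faster
-- what changed: Replaces A's per-t binary search over the range one..two-billion (about thirty-one iterations each) by solving the quadratic m*(m-1)/2 + m*d = n in closed form with math.isqrt plus an exact perfect-square and parity check, keeping the same range bound and odd-m filter.
import Mathlib
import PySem

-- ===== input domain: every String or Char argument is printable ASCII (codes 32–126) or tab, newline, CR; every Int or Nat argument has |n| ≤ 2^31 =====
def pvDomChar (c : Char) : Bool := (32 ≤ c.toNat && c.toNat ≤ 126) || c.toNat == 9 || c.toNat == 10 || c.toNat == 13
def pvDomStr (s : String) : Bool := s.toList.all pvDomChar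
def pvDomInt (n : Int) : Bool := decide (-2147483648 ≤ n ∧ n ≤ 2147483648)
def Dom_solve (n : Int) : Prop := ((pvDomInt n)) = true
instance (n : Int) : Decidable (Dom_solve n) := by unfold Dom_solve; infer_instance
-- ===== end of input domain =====

-- B replaces A's per-t binary search over [1, 2*10^9] by the closed-form root of the
-- quadratic m*(m-1)/2 + m*d = n via math.isqrt (objective: faster, O(1) per t).

-- ===== PORT A =====
-- c = m*(m-1)//2 + m*d, as in A's loop body
def cvalA (d m : Int) : Int := PySem.Int.floordiv (m * (m - 1)) 2 + m * d

-- the `while l <= r` binary search; returns the m on which A breaks with c = n, if any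
def bsearchA (n d l r : Int) : Option Int :=
  if _h : l ≤ r then
    let m := PySem.Int.floordiv (l + r) 2   -- m = l + r >> 1
    let c := cvalA d m
    if c < n then bsearchA n d (m + 1) r
    else if n < c then bsearchA n d l (m - 1)
    else some m
  else none
termination_by (r + 1 - l).toNat
decreasing_by
  · have := PySem.Int.floordiv_two_mid_bounds (lo := l) (hi := r) _h
    omega
  · have := PySem.Int.floordiv_two_mid_bounds (lo := l) (hi := r) _h
    omega

def solve (n : Int) : List Int :=
  let ans := (List.range 60).foldl (fun ans (t : Nat) =>
    let d : Int := ((1 : Int) <<< t) - 1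
    match bsearchA n d 1 2000000000 with
    | some m => if m % 2 = 1 then ans ++ [m * (d + 1)] else ans  -- m & 1, m ≥ 1 here
    | none => ans) []
  if ans = [] then ans ++ [-1] else PySem.List.sorted ans (fun x => x) false

-- ===== PORT B =====
def solve_alt (n : Int) : List Int :=
  let ans := (List.range 60).foldl (fun ans (t : Nat) =>
    let d : Int := ((1 : Int) <<< t) - 1
    let b := 2 * d - 1
    let disc := b * b + 8 * n
    if disc < 0 then ans
    else
      let s : Int := (Nat.sqrt disc.toNat : Int)   -- math.isqrt(disc)
      if s * s ≠ disc ∨ PySem.Int.mod (s - b) 2 ≠ 0 then ans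
      else
        let m := PySem.Int.floordiv (s - b) 2
        if 1 ≤ m ∧ m ≤ 2000000000 ∧ PySem.Int.mod m 2 = 1 then ans ++ [m * (d + 1)]
        else ans) []
  if ans = [] then [-1] else PySem.List.sorted ans (fun x => x) false

-- ===== PRECONDITION & SPEC =====
def Spec_solve (n : Int) (out : List Int) : Prop := out = solve_alt n
instance (n : Int) (out : List Int) : Decidable (Spec_solve n out) := by unfold Spec_solve; infer_instance

-- ===== CLAIM (what is proved, stated in full; the proofs are below) =====
def Claim_equal_solve : Prop := ∀ (n : Int), Dom_solve n → Spec_solve n (solve n)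

-- ===== LEMMAS AND PROOFS =====

theorem cvalA_two (d m : Int) : 2 * cvalA d m = m * (m - 1) + 2 * (m * d) := by
  have hdvd : (2:Int) ∣ m*(m-1) := (Int.even_mul_pred_self m).two_dvd
  have hm0 : PySem.Int.mod (m*(m-1)) 2 = 0 := (PySem.Int.mod_eq_zero_iff_dvd _ _).2 hdvd
  have h := PySem.Int.floordiv_mul_add_mod (m*(m-1)) 2
  unfold cvalA; omega

theorem cvalA_mono {d a b2 : Int} (hd : 0 ≤ d) (ha : 1 ≤ a) (hab : a < b2) :
    cvalA d a < cvalA d b2 := by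
  have h1 := cvalA_two d a
  have h2 := cvalA_two d b2
  nlinarith

theorem bsearchA_sound {n d l r m : Int} (h : bsearchA n d l r = some m) :
    l ≤ m ∧ m ≤ r ∧ cvalA d m = n := by
  fun_induction bsearchA n d l r with
  | case1 l r hlr mid c hlt ih =>
      have hb := PySem.Int.floordiv_two_mid_bounds (lo := l) (hi := r) hlr
      have := ih h
      omega
  | case2 l r hlr mid c hlt hgt ih =>
      have hb := PySem.Int.floordiv_two_mid_bounds (lo := l) (hi := r) hlr
      have := ih h
      omega
  | case3 l r hlr mid c hlt hgt =>
      have hb := PySem.Int.floordiv_two_mid_bounds (lo := l) (hi := r) hlr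
      simp only [Option.some.injEq] at h
      subst h
      refine ⟨hb.1, hb.2, by omega⟩
  | case4 l r hlr => simp at h

theorem bsearchA_complete {n d l r m : Int} (hd : 0 ≤ d) (hl : 1 ≤ l)
    (h1 : l ≤ m) (h2 : m ≤ r) (hc : cvalA d m = n) :
    bsearchA n d l r = some m := by
  fun_induction bsearchA n d l r with
  | case1 l r hlr mid c hlt ih =>
      have hb := PySem.Int.floordiv_two_mid_bounds (lo := l) (hi := r) hlr
      -- c = cvalA d mid < n = cvalA d m, so mid < m
      apply ih (by omega)
      · by_contra hmm
        push Not at hmm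
        rcases lt_or_eq_of_le (by omega : m ≤ mid) with hlt2 | heq
        · have := cvalA_mono hd (by omega : 1 ≤ m) hlt2
          omega
        · subst heq; omega
      · exact h2
  | case2 l r hlr mid c hlt hgt ih =>
      have hb := PySem.Int.floordiv_two_mid_bounds (lo := l) (hi := r) hlr
      apply ih hl h1
      by_contra hmm
      push Not at hmm
      rcases lt_or_eq_of_le (by omega : mid ≤ m) with hlt2 | heq
      · have := cvalA_mono hd (by omega : 1 ≤ mid) hlt2
        omega
      · subst heq; omega
  | case3 l r hlr mid c hlt hgt =>
      have hb := PySem.Int.floordiv_two_mid_bounds (lo := l) (hi := r) hlr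
      have hceq : cvalA d mid = n := by omega
      congr 1
      rcases lt_trichotomy mid m with h | h | h
      · have := cvalA_mono hd (by omega : 1 ≤ mid) h; omega
      · exact h
      · have := cvalA_mono hd (by omega : 1 ≤ m) h; omega
  | case4 l r hlr => omega

-- the per-t step functions of the two foldls agree whenever 0 ≤ d
theorem step_eq (n d : Int) (hd : 0 ≤ d) (ans : List Int) :
    (match bsearchA n d 1 2000000000 with
     | some m => if m % 2 = 1 then ans ++ [m * (d + 1)] else ans
     | none => ans) =
    (let b := 2 * d - 1
     let disc := b * b + 8 * n
     if disc < 0 then ans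
     else
       let s : Int := (Nat.sqrt disc.toNat : Int)
       if s * s ≠ disc ∨ PySem.Int.mod (s - b) 2 ≠ 0 then ans
       else
         let m := PySem.Int.floordiv (s - b) 2
         if 1 ≤ m ∧ m ≤ 2000000000 ∧ PySem.Int.mod m 2 = 1 then ans ++ [m * (d + 1)]
         else ans) := by
  simp only []
  cases hs : bsearchA n d 1 2000000000 with
  | some m =>
      obtain ⟨h1, h2, hc⟩ := bsearchA_sound hs
      have h2n : m * (m - 1) + 2 * (m * d) = 2 * n := by
        have := cvalA_two d m; omega
      have hdisc : (2*d-1) * (2*d-1) + 8 * n = (2*m + (2*d-1)) * (2*m + (2*d-1)) := by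
        linear_combination (-4 : Int) * h2n
      have hmb : (0:Int) ≤ 2*m + (2*d-1) := by omega
      set k : Nat := (2*m + (2*d-1)).toNat with hk
      have hkc : (k : Int) = 2*m + (2*d-1) := Int.toNat_of_nonneg hmb
      have hdk : (2*d-1) * (2*d-1) + 8 * n = ((k * k : Nat) : Int) := by
        push_cast [hkc]; linarith [hdisc]
      have hnonneg : ¬ ((2*d-1) * (2*d-1) + 8 * n < 0) := by
        rw [hdk]; omega
      have htn : ((2*d-1) * (2*d-1) + 8 * n).toNat = k * k := by omega
      have hsq : (Nat.sqrt ((2*d-1) * (2*d-1) + 8 * n).toNat : Int) = (k : Int) := by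
        rw [htn, Nat.sqrt_eq k]
      rw [if_neg hnonneg, hsq]
      have hsb : (k : Int) - (2*d-1) = 2 * m := by omega
      have hmod0 : PySem.Int.mod ((k:Int) - (2*d-1)) 2 = 0 := by
        rw [hsb, (PySem.Int.mod_eq_zero_iff_dvd _ _)]; exact ⟨m, by ring⟩
      have hguard : ¬ ((k:Int) * (k:Int) ≠ (2*d-1) * (2*d-1) + 8 * n ∨
          PySem.Int.mod ((k:Int) - (2*d-1)) 2 ≠ 0) := by
        push Not
        exact ⟨by rw [hdk]; push_cast; ring, hmod0⟩
      rw [if_neg hguard]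
      have hfd : PySem.Int.floordiv ((k:Int) - (2*d-1)) 2 = m := by
        rw [hsb, (PySem.Int.floordiv_eq_iff_of_pos (by norm_num))]
        constructor <;> omega
      rw [hfd]
      show (if m % 2 = 1 then ans ++ [m * (d + 1)] else ans) = _
      have hme : PySem.Int.mod m 2 = m % 2 := PySem.Int.mod_eq_emod_of_pos (by norm_num)
      by_cases hodd : m % 2 = 1
      · rw [if_pos hodd, if_pos ⟨h1, h2, by rw [hme]; exact hodd⟩]
      · rw [if_neg hodd, if_neg (by rw [hme]; tauto)]
  | none =>
      split_ifs with hlt hguard hcond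
      · rfl
      · rfl
      · exfalso
        push Not at hguard
        obtain ⟨hsq, hmod0⟩ := hguard
        set s : Int := (Nat.sqrt ((2*d-1) * (2*d-1) + 8 * n).toNat : Int) with hsdef
        set m : Int := PySem.Int.floordiv (s - (2*d-1)) 2 with hmdef
        obtain ⟨h1, h2, hodd⟩ := hcond
        have hfm := PySem.Int.floordiv_mul_add_mod (s - (2*d-1)) 2
        have hsb : s = 2 * m + (2*d-1) := by rw [hmdef]; omega
        have h2n : m * (m - 1) + 2 * (m * d) = 2 * n := by
          have : (2*m + (2*d-1)) * (2*m + (2*d-1)) = (2*d-1) * (2*d-1) + 8 * n := by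
            rw [← hsb]; exact hsq
          nlinarith [this]
        have hc : cvalA d m = n := by have := cvalA_two d m; omega
        have := bsearchA_complete hd (le_refl 1) h1 h2 hc
        rw [hs] at this; exact absurd this (by simp)
      · rfl

-- ===== VERDICT (by name: the statement is the Claim_ definition above) =====
theorem solve_spec : Claim_equal_solve := by
  intro n _
  unfold Spec_solve solve solve_alt
  have hfold : (List.range 60).foldl (fun ans (t : Nat) =>
      let d : Int := ((1 : Int) <<< t) - 1
      match bsearchA n d 1 2000000000 with
      | some m => if m % 2 = 1 then ans ++ [m * (d + 1)] else ans
      | none => ans) [] =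
    (List.range 60).foldl (fun ans (t : Nat) =>
      let d : Int := ((1 : Int) <<< t) - 1
      let b := 2 * d - 1
      let disc := b * b + 8 * n
      if disc < 0 then ans
      else
        let s : Int := (Nat.sqrt disc.toNat : Int)
        if s * s ≠ disc ∨ PySem.Int.mod (s - b) 2 ≠ 0 then ans
        else
          let m := PySem.Int.floordiv (s - b) 2
          if 1 ≤ m ∧ m ≤ 2000000000 ∧ PySem.Int.mod m 2 = 1 then ans ++ [m * (d + 1)]
          else ans) [] := by
    apply PySem.List.foldl_congr_mem
    intro acc t _
    have hd : (0:Int) ≤ ((1 : Int) <<< t) - 1 := by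
      have h2 : (1:Int) <<< t = 2 ^ t := by simp [Int.shiftLeft_eq]
      have : (1:Int) ≤ 2 ^ t := one_le_pow₀ (by norm_num)
      omega
    exact step_eq n (((1 : Int) <<< t) - 1) hd acc
  rw [hfold]
  by_cases he : (List.range 60).foldl (fun ans (t : Nat) =>
      let d : Int := ((1 : Int) <<< t) - 1
      let b := 2 * d - 1
      let disc := b * b + 8 * n
      if disc < 0 then ans
      else
        let s : Int := (Nat.sqrt disc.toNat : Int)
        if s * s ≠ disc ∨ PySem.Int.mod (s - b) 2 ≠ 0 then ans
        else
          let m := PySem.Int.floordiv (s - b) 2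
          if 1 ≤ m ∧ m ≤ 2000000000 ∧ PySem.Int.mod m 2 = 1 then ans ++ [m * (d + 1)]
          else ans) [] = []
  · rw [if_pos he, if_pos he, he]; rfl
  · rw [if_neg he, if_neg he]
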